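-- pv_equiv track=rewrite | github.com/juanfranj/CodeWars | python/7kyu/7kyu_MakeEqual.py | count
-- ===== SOURCE A (Python) =====
-- import collections
--
-- def count(a, t, x):
--
--     dic = collections.Counter(a)
--     sum = t
--     cont = 0
--     if sum in dic.keys():
--             cont += dic[sum]
--
--     while sum < max(a) and x != 0:
--         sum += abs(x)
--         if sum in dic.keys():
--             cont += dic[sum]
--
--     sum = t
--     while sum > min(a) and x != 0:
--         sum -= abs(x)
--         if sum in dic.keys():
--             cont += dic[sum]
--     return cont
-- ===== SOURCE B (Python) =====
-- def count(a, t, x):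
--     d = abs(x)
--     if d == 0:
--         return sum(1 for e in a if e == t)
--     return sum(1 for e in a if (e - t) % d == 0)
-- ===== Notes on version B (the rewrite author's own statement) =====
-- stated objective: faster
-- what changed: A builds a Counter and walks every multiple of |x| between min(a) and max(a) looking each up; B makes a single pass over the list counting elements e with (e-t) % |x| == 0 (e == t when x == 0), so the (max-min)/|x| walk disappears.
import Mathlib
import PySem

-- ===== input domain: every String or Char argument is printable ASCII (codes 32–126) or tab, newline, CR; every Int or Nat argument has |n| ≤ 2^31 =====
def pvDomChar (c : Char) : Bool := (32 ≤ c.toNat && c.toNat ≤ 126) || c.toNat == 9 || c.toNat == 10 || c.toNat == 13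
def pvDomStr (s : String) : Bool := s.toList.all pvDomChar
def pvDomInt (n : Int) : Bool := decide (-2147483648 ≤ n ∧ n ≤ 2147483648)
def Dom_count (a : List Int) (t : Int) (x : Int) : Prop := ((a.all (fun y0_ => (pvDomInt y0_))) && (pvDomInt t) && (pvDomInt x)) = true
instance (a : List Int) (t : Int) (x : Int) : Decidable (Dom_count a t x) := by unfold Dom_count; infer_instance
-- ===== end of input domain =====

-- B replaces A's Counter-and-walk over every multiple of |x| between min(a) and max(a)
-- by a single pass counting elements e with (e - t) % |x| == 0 (e == t when x == 0).


-- ===== PORT A =====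
-- 'if sum in dic.keys(): cont += dic[sum]'
def countStep (dic : PySem.Dict Int Int) (s cont : Int) : Int :=
  if dic.contains s then cont + dic.getD s 0 else cont

-- 'while sum < max(a) and x != 0: sum += abs(x); if sum in dic.keys(): cont += dic[sum]'
def countUp (dic : PySem.Dict Int Int) (mx x : Int) (sum cont : Int) : Int :=
  if h : sum < mx ∧ x ≠ 0 then
    countUp dic mx x (sum + |x|) (countStep dic (sum + |x|) cont)
  else cont
termination_by (mx - sum).toNat
decreasing_by
  have : 0 < |x| := abs_pos.mpr h.2
  omega

-- 'while sum > min(a) and x != 0: sum -= abs(x); if sum in dic.keys(): cont += dic[sum]'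
def countDown (dic : PySem.Dict Int Int) (mn x : Int) (sum cont : Int) : Int :=
  if h : mn < sum ∧ x ≠ 0 then
    countDown dic mn x (sum - |x|) (countStep dic (sum - |x|) cont)
  else cont
termination_by (sum - mn).toNat
decreasing_by
  have : 0 < |x| := abs_pos.mpr h.2
  omega

-- port of A; Python's max(a)/min(a) raise ValueError on [], excluded by Pre_count (the 0 arm is unreachable there)
def count (a : List Int) (t : Int) (x : Int) : Int :=
  let dic := PySem.Dict.counter a
  let cont := countStep dic t 0
  match PySem.List.max? a (fun y => y), PySem.List.min? a (fun y => y) with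
  | some mx, some mn => countDown dic mn x t (countUp dic mx x t cont)
  | _, _ => 0

-- ===== PORT B =====
def count_alt (a : List Int) (t : Int) (x : Int) : Int :=
  let d := |x|
  if d = 0 then a.foldl (fun c e => if e = t then c + 1 else c) 0
  else a.foldl (fun c e => if PySem.Int.mod (e - t) d = 0 then c + 1 else c) 0

-- ===== PRECONDITION & SPEC =====
-- Pre_ excludes exactly the empty list, on which Python's max(a) raises ValueError.
def Pre_count (a : List Int) (t : Int) (x : Int) : Prop := a ≠ []
instance (a : List Int) (t : Int) (x : Int) : Decidable (Pre_count a t x) := by unfold Pre_count; infer_instance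
def pvWitness_count : List Int × Int × Int := ([1, 3, 7], 1, 2)

def Spec_count (a : List Int) (t : Int) (x : Int) (out : Int) : Prop := out = count_alt a t x
instance (a : List Int) (t : Int) (x : Int) (out : Int) : Decidable (Spec_count a t x out) := by unfold Spec_count; infer_instance

-- ===== CLAIM (what is proved, stated in full; the proofs are below) =====
def Claim_equal_count : Prop := ∀ (a : List Int) (t : Int) (x : Int), Dom_count a t x → Pre_count a t x → Spec_count a t x (count a t x)
-- ===== LEMMAS AND PROOFS =====

-- the counter lookup step adds exactly the multiplicity of s in a
lemma countStep_counter (a : List Int) (s cont : Int) :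
    countStep (PySem.Dict.counter a) s cont = cont + (a.count s : Int) := by
  unfold countStep
  by_cases h : (PySem.Dict.counter a).contains s = true
  · simp [h, PySem.Dict.getD_counter]
  · have hs : s ∉ a := by
      intro hmem
      exact h (by simpa [PySem.Dict.contains_counter] using hmem)
    simp [h, List.count_eq_zero_of_not_mem hs]

-- one step of the upward split: pred at sum = (· = sum+d) ⊕ pred at sum+d
lemma key_split_up (d sum e : Int) (hd : 0 < d) :
    (sum < e ∧ d ∣ (e - sum)) ↔ (e = sum + d ∨ (sum + d < e ∧ d ∣ (e - (sum + d)))) := by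
  constructor
  · rintro ⟨hlt, hdvd⟩
    have hge : d ≤ e - sum := Int.le_of_dvd (by omega) hdvd
    rcases eq_or_lt_of_le hge with heq | hlt2
    · left; omega
    · right
      refine ⟨by omega, ?_⟩
      have he : e - (sum + d) = (e - sum) - d := by ring
      rw [he]; exact dvd_sub hdvd dvd_rfl
  · rintro (rfl | ⟨hlt, hdvd⟩)
    · exact ⟨by omega, by simp⟩
    · refine ⟨by omega, ?_⟩
      have he : e - sum = (e - (sum + d)) + d := by ring
      rw [he]; exact dvd_add hdvd dvd_rfl

lemma key_split_down (d sum e : Int) (hd : 0 < d) :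
    (e < sum ∧ d ∣ (sum - e)) ↔ (e = sum - d ∨ (e < sum - d ∧ d ∣ ((sum - d) - e))) := by
  constructor
  · rintro ⟨hlt, hdvd⟩
    have hge : d ≤ sum - e := Int.le_of_dvd (by omega) hdvd
    rcases eq_or_lt_of_le hge with heq | hlt2
    · left; omega
    · right
      refine ⟨by omega, ?_⟩
      have he : (sum - d) - e = (sum - e) - d := by ring
      rw [he]; exact dvd_sub hdvd dvd_rfl
  · rintro (rfl | ⟨hlt, hdvd⟩)
    · refine ⟨by omega, ?_⟩
      have he : sum - (sum - d) = d := by ring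
      rw [he]
    · refine ⟨by omega, ?_⟩
      have he : sum - e = ((sum - d) - e) + d := by ring
      rw [he]; exact dvd_add hdvd dvd_rfl

lemma countP_split_up (a : List Int) (d sum : Int) (hd : 0 < d) :
    a.countP (fun e => decide (sum < e ∧ d ∣ (e - sum)))
      = a.count (sum + d) + a.countP (fun e => decide (sum + d < e ∧ d ∣ (e - (sum + d)))) := by
  induction a with
  | nil => simp
  | cons y tl ih =>
    simp only [List.countP_cons, List.count_cons, ih]
    rcases (key_split_up d sum y hd) with h
    by_cases h1 : y = sum + d
    · subst h1; simp [h.mpr (Or.inl rfl)]; omega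
    · by_cases h2 : sum < y ∧ d ∣ (y - sum)
      · have := (h.mp h2).resolve_left h1
        simp [h2, this, h1]; omega
      · have h3 : ¬ (sum + d < y ∧ d ∣ (y - (sum + d))) := fun hc => h2 (h.mpr (Or.inr hc))
        simp [h2, h3, h1]

lemma countP_split_down (a : List Int) (d sum : Int) (hd : 0 < d) :
    a.countP (fun e => decide (e < sum ∧ d ∣ (sum - e)))
      = a.count (sum - d) + a.countP (fun e => decide (e < sum - d ∧ d ∣ ((sum - d) - e))) := by
  induction a with
  | nil => simp
  | cons y tl ih =>
    simp only [List.countP_cons, List.count_cons, ih]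
    rcases (key_split_down d sum y hd) with h
    by_cases h1 : y = sum - d
    · subst h1; simp [h.mpr (Or.inl rfl)]; omega
    · by_cases h2 : y < sum ∧ d ∣ (sum - y)
      · have := (h.mp h2).resolve_left h1
        simp [h2, this, h1]; omega
      · have h3 : ¬ (y < sum - d ∧ d ∣ ((sum - d) - y)) := fun hc => h2 (h.mpr (Or.inr hc))
        simp [h2, h3, h1]

-- the upward loop counts the elements strictly above sum reachable by steps of |x|
lemma countUp_eq (a : List Int) (mx x : Int) (hx : x ≠ 0)
    (hmx : ∀ e ∈ a, e ≤ mx) :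
    ∀ sum cont, countUp (PySem.Dict.counter a) mx x sum cont
      = cont + (a.countP (fun e => decide (sum < e ∧ |x| ∣ (e - sum))) : Int) := by
  intro sum cont
  fun_induction countUp (PySem.Dict.counter a) mx x sum cont with
  | case1 sum cont h ih =>
    rw [ih, countStep_counter]
    have hd : 0 < |x| := abs_pos.mpr hx
    rw [countP_split_up a |x| sum hd]
    push_cast; ring
  | case2 sum cont h =>
    have hge : mx ≤ sum := by
      by_contra hc; exact h ⟨by omega, hx⟩
    have : a.countP (fun e => decide (sum < e ∧ |x| ∣ (e - sum))) = 0 := by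
      apply List.countP_eq_zero.mpr
      intro e he
      have := hmx e he
      simp only [decide_eq_true_eq]
      omega
    rw [this]; simp

lemma countDown_eq (a : List Int) (mn x : Int) (hx : x ≠ 0)
    (hmn : ∀ e ∈ a, mn ≤ e) :
    ∀ sum cont, countDown (PySem.Dict.counter a) mn x sum cont
      = cont + (a.countP (fun e => decide (e < sum ∧ |x| ∣ (sum - e))) : Int) := by
  intro sum cont
  fun_induction countDown (PySem.Dict.counter a) mn x sum cont with
  | case1 sum cont h ih =>
    rw [ih, countStep_counter]
    have hd : 0 < |x| := abs_pos.mpr hx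
    rw [countP_split_down a |x| sum hd]
    push_cast; ring
  | case2 sum cont h =>
    have hge : sum ≤ mn := by
      by_contra hc; exact h ⟨by omega, hx⟩
    have : a.countP (fun e => decide (e < sum ∧ |x| ∣ (sum - e))) = 0 := by
      apply List.countP_eq_zero.mpr
      intro e he
      have := hmn e he
      simp only [decide_eq_true_eq]
      omega
    rw [this]; simp

-- trichotomy partition of the divisibility count
lemma countP_tri (a : List Int) (d t : Int) :
    a.countP (fun e => decide (d ∣ (e - t)))
      = a.count t + a.countP (fun e => decide (t < e ∧ d ∣ (e - t)))
        + a.countP (fun e => decide (e < t ∧ d ∣ (t - e))) := by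
  induction a with
  | nil => simp
  | cons y tl ih =>
    simp only [List.countP_cons, List.count_cons, ih, decide_eq_true_eq, beq_iff_eq]
    have hneg : (d ∣ (t - y)) ↔ (d ∣ (y - t)) := dvd_sub_comm
    by_cases h0 : d ∣ (y - t)
    · simp only [h0, hneg.mpr h0, and_true, if_pos]
      split_ifs <;> omega
    · have hyt : y ≠ t := by rintro rfl; exact h0 (by simp)
      have h1 : ¬ (d ∣ (t - y)) := fun hc => h0 (hneg.mp hc)
      simp [h0, h1, hyt]

lemma countUp_x_zero (dic : PySem.Dict Int Int) (mx sum cont : Int) :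
    countUp dic mx 0 sum cont = cont := by
  unfold countUp; simp

lemma countDown_x_zero (dic : PySem.Dict Int Int) (mn sum cont : Int) :
    countDown dic mn 0 sum cont = cont := by
  unfold countDown; simp

-- ===== VERDICT (by name: the statement is the Claim_ definition above) =====
theorem count_spec : Claim_equal_count := by
  intro a t x _ hpre
  unfold Spec_count count count_alt
  obtain ⟨mx, hmx⟩ : ∃ mx, PySem.List.max? a (fun y => y) = some mx := by
    cases h : PySem.List.max? a (fun y => y) with
    | none => exact absurd ((PySem.List.max?_eq_none_iff a (fun y => y)).mp h) hpre
    | some m => exact ⟨m, rfl⟩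
  obtain ⟨mn, hmn⟩ : ∃ mn, PySem.List.min? a (fun y => y) = some mn := by
    cases h : PySem.List.min? a (fun y => y) with
    | none => exact absurd ((PySem.List.min?_eq_none_iff a (fun y => y)).mp h) hpre
    | some m => exact ⟨m, rfl⟩
  simp only [hmx, hmn]
  by_cases hx : x = 0
  · subst hx
    simp only [abs_zero, countUp_x_zero, countDown_x_zero, countStep_counter]
    rw [PySem.List.foldl_ite_add_one (fun e => e = t)]
    rw [List.count_eq_countP]
    have : a.countP (fun e => e == t) = a.countP (fun e => decide (e = t)) :=
      List.countP_congr (fun e _ => by simp)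
    rw [this]; simp
  · have hd : 0 < |x| := abs_pos.mpr hx
    rw [if_neg (by omega)]
    rw [countUp_eq a mx x hx (fun e he => PySem.List.max?_isMax hmx e he)]
    rw [countDown_eq a mn x hx (fun e he => PySem.List.min?_isMin hmn e he)]
    rw [countStep_counter]
    rw [PySem.List.foldl_ite_add_one (fun e => PySem.Int.mod (e - t) |x| = 0)]
    have hP : a.countP (fun e => decide (PySem.Int.mod (e - t) |x| = 0))
        = a.countP (fun e => decide (|x| ∣ (e - t))) := by
      apply List.countP_congr
      intro e _
      simp [PySem.Int.mod_eq_zero_iff_dvd (e - t) |x|]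
    rw [hP, countP_tri a |x| t]
    push_cast
    ring
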